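-- pv_equiv track=rewrite | github.com/skochv04/algorithms-and-data-structures | BeforeExam 1 - Graphs/8 dwarves and trolls.py | BFS
-- ===== SOURCE A (Python) =====
-- from queue import Queue
--
-- def BFS(G, trolls, start, s, t):
--     queue = Queue()
--     queue.put(t)
--     visited = [False] * len(G)
--     visited[t] = True
--     visited[s] = True
--     trolls_number = trolls[t]
--     while not queue.empty():
--         u = queue.get()
--         for v in G[u]:
--             if not visited[v]:
--                 trolls_number += trolls[v]
--                 queue.put(v)
--                 visited[v] = True
--     return trolls_number
-- ===== SOURCE B (Python) =====
-- def BFS(G, trolls, start, s, t):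
--     # fixpoint saturation instead of a worklist traversal: repeatedly sweep all
--     # nodes, expanding every node already known reachable from t, until a full
--     # sweep adds nothing; the answer is the same order-independent sum.
--     n = len(G)
--     visited = [False] * n
--     visited[t] = True
--     visited[s] = True
--     reach = [False] * n
--     reach[t] = True
--     total = trolls[t]
--     changed = True
--     while changed:
--         changed = False
--         for u in range(n):
--             if reach[u]:
--                 for v in G[u]:
--                     if not visited[v]:
--                         visited[v] = True
--                         reach[v] = True
--                         total += trolls[v]
--                         changed = True
--     return total
-- ===== Notes on version B (the rewrite author's own statement) =====
-- stated objective: alternative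
-- what changed: Replaces the queue-driven BFS traversal by a worklist-free fixpoint saturation: B repeatedly sweeps over all node indices, expanding every node already known reachable from t and marking/adding unseen neighbours, until one full sweep changes nothing; the sum is the same because it is an order-independent sum over the reachable set.
-- outside the precondition, e.g. on BFS([[1, -3], [], [], []], [5, 7], 0, 0, 0): A returns 12, B returns 12
import Mathlib
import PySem

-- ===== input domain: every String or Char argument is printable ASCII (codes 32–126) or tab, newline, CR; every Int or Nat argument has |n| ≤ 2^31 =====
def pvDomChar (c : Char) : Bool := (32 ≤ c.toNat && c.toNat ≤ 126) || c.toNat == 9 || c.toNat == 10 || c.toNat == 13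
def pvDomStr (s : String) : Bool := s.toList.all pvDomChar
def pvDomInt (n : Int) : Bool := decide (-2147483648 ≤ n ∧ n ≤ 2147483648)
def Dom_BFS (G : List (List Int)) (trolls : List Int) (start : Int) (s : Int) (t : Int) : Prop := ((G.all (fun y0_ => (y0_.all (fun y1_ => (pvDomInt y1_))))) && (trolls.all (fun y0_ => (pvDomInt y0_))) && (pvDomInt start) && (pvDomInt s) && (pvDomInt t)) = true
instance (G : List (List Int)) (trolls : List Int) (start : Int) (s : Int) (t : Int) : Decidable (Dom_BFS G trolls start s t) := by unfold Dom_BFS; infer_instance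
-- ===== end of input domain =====

-- B replaces A's queue-driven BFS by a worklist-free fixpoint saturation (repeated full
-- sweeps until no change): the result is an order-independent sum over the reachable set.

-- ===== PORT A =====
-- shared Python-primitive accessors (visited[i], visited[i]=True, trolls[i], G[i])
def pyVisGet (vis : List Bool) (i : Int) : Bool := PySem.List.pyGetD vis i false
def pyVisSet (vis : List Bool) (i : Int) : List Bool := PySem.List.pySetD vis i true
def pyTroll (trolls : List Int) (i : Int) : Int := PySem.List.pyGetD trolls i 0
def pyRow (G : List (List Int)) (i : Int) : List Int := PySem.List.pyGetD G i []

-- body of A's inner 'for v in G[u]' loop; state = (queue rest, visited, trolls_number)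
def bfsStep (trolls : List Int) (st : List Int × List Bool × Int) (v : Int) :
    List Int × List Bool × Int :=
  if pyVisGet st.2.1 v then st
  else (st.1 ++ [v], pyVisSet st.2.1 v, st.2.2 + pyTroll trolls v)

-- A's 'while not queue.empty()' loop; queue.get() takes the FRONT. The fuel only makes the
-- recursion structural: 2*len(G)+2 strictly dominates the loop's iteration count (proved below).
def bfsLoop (G : List (List Int)) (trolls : List Int) :
    Nat → List Int → List Bool → Int → Int
  | 0, _, _, tot => tot
  | _ + 1, [], _, tot => tot
  | fuel + 1, u :: qs, vis, tot =>
      let st := (pyRow G u).foldl (bfsStep trolls) (qs, vis, tot)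
      bfsLoop G trolls fuel st.1 st.2.1 st.2.2

def BFS (G : List (List Int)) (trolls : List Int) (start : Int) (s : Int) (t : Int) : Int :=
  let visited := pyVisSet (pyVisSet (List.replicate G.length false) t) s
  bfsLoop G trolls (2 * G.length + 2) [t] visited (pyTroll trolls t)

-- ===== PORT B =====
-- B's innermost 'for v in G[u]'; state = (visited, reach, total, changed)
def satStep (trolls : List Int) (st : List Bool × List Bool × Int × Bool) (v : Int) :
    List Bool × List Bool × Int × Bool :=
  if pyVisGet st.1 v then st
  else (pyVisSet st.1 v, pyVisSet st.2.1 v, st.2.2.1 + pyTroll trolls v, true)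

-- one iteration of B's 'for u in range(n)': expand u only if reach[u]
def sweepStep (G : List (List Int)) (trolls : List Int)
    (st : List Bool × List Bool × Int × Bool) (u : Nat) :
    List Bool × List Bool × Int × Bool :=
  if pyVisGet st.2.1 (u : Int) = true then (pyRow G (u : Int)).foldl (satStep trolls) st else st

-- one full sweep of B's 'for u in range(n)' with changed reset to False
def satSweep (G : List (List Int)) (trolls : List Int) (vis reach : List Bool) (tot : Int) :
    List Bool × List Bool × Int × Bool :=
  (List.range G.length).foldl (sweepStep G trolls) (vis, reach, tot, false)

-- B's 'while changed' loop. The fuel only makes the recursion structural: len(G)+1 strictly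
-- dominates the number of sweeps (each sweep that continues marks a new node, proved below).
def satLoop (G : List (List Int)) (trolls : List Int) :
    Nat → List Bool → List Bool → Int → Int
  | 0, _, _, tot => tot
  | fuel + 1, vis, reach, tot =>
      let r := satSweep G trolls vis reach tot
      if r.2.2.2 = true then satLoop G trolls fuel r.1 r.2.1 r.2.2.1 else r.2.2.1

def BFS_alt (G : List (List Int)) (trolls : List Int) (start : Int) (s : Int) (t : Int) : Int :=
  let visited := pyVisSet (pyVisSet (List.replicate G.length false) t) s
  let reach := pyVisSet (List.replicate G.length false) t
  satLoop G trolls (G.length + 1) visited reach (pyTroll trolls t)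

-- ===== PRECONDITION & SPEC =====
-- the array slot a Python index i (possibly negative) denotes in a list of length n
def slotOf (n : Nat) (v : Int) : Nat := (if v < 0 then v + n else v).toNat

-- the adjacency row of slot j
def rowOf (G : List (List Int)) (j : Nat) : List Int := PySem.List.pyGetD G (j : Int) []

-- one saturation round of the set of reachable slots (s's slot is pre-visited, so it is
-- expanded only when it is t's slot)
def rstep (G : List (List Int)) (ss st : Nat) (S : Finset Nat) : Finset Nat :=
  S ∪ S.biUnion (fun j =>
    if j = st ∨ j ≠ ss then ((rowOf G j).map (slotOf G.length)).toFinset else ∅)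

-- the slots the traversal expands: the closure of {t's slot} (reached in < len(G) rounds)
def rset (G : List (List Int)) (ss st : Nat) : Finset Nat :=
  (rstep G ss st)^[G.length] {st}

-- Pre_ excludes (i) inputs on which the traversal dereferences an index outside both the
-- negative-wraparound and positive range of the touched array — there A raises IndexError —
-- and (ii) inputs whose reachable rows name one node by two spellings (v and v-len(G))
-- that wrap to different troll entries (len(trolls) ≠ len(G)) with different counts: there
-- the returned sum depends on the traversal order, so A's (and B's) value is accidental
-- (see the cites, where A and B legitimately differ or coincide by luck).  The quantifier
-- runs over the graph-theoretic closure rset — a shape of the input, not a run of either loop.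
def Pre_BFS (G : List (List Int)) (trolls : List Int) (start : Int) (s : Int) (t : Int) : Prop :=
  -(G.length : Int) ≤ t ∧ t < (G.length : Int) ∧
  -(trolls.length : Int) ≤ t ∧ t < (trolls.length : Int) ∧
  -(G.length : Int) ≤ s ∧ s < (G.length : Int) ∧
  (∀ j ∈ rset G (slotOf G.length s) (slotOf G.length t),
    (j = slotOf G.length t ∨ j ≠ slotOf G.length s) →
    ∀ v ∈ rowOf G j, -(G.length : Int) ≤ v ∧ v < (G.length : Int)) ∧
  (∀ j ∈ rset G (slotOf G.length s) (slotOf G.length t),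
    (j = slotOf G.length t ∨ j ≠ slotOf G.length s) →
    ∀ v ∈ rowOf G j, slotOf G.length v ≠ slotOf G.length s →
      slotOf G.length v ≠ slotOf G.length t →
      -(trolls.length : Int) ≤ v ∧ v < (trolls.length : Int)) ∧
  (∀ j ∈ rset G (slotOf G.length s) (slotOf G.length t),
    (j = slotOf G.length t ∨ j ≠ slotOf G.length s) →
    ∀ v ∈ rowOf G j, slotOf G.length v ≠ slotOf G.length s →
      slotOf G.length v ≠ slotOf G.length t →
      ∀ j' ∈ rset G (slotOf G.length s) (slotOf G.length t),
        (j' = slotOf G.length t ∨ j' ≠ slotOf G.length s) →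
        ∀ v' ∈ rowOf G j', slotOf G.length v' = slotOf G.length v →
          pyTroll trolls v' = pyTroll trolls v)

instance (G : List (List Int)) (trolls : List Int) (start : Int) (s : Int) (t : Int) :
    Decidable (Pre_BFS G trolls start s t) := by
  unfold Pre_BFS
  refine @instDecidableAnd _ _ ?_ (@instDecidableAnd _ _ ?_ (@instDecidableAnd _ _ ?_
    (@instDecidableAnd _ _ ?_ (@instDecidableAnd _ _ ?_ (@instDecidableAnd _ _ ?_
    (@instDecidableAnd _ _ ?_ (@instDecidableAnd _ _ ?_ ?_)))))))
  all_goals infer_instance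

def pvWitness_BFS : List (List Int) × List Int × Int × Int × Int := ([[1], [0]], [2, 3], 0, 0, 1)

def Spec_BFS (G : List (List Int)) (trolls : List Int) (start : Int) (s : Int) (t : Int) (out : Int) : Prop := out = BFS_alt G trolls start s t
instance (G : List (List Int)) (trolls : List Int) (start : Int) (s : Int) (t : Int) (out : Int) : Decidable (Spec_BFS G trolls start s t out) := by unfold Spec_BFS; infer_instance

-- ===== CLAIM (what is proved, stated in full; the proofs are below) =====
def Claim_equal_BFS : Prop := ∀ (G : List (List Int)) (trolls : List Int) (start : Int) (s : Int) (t : Int), Dom_BFS G trolls start s t → Pre_BFS G trolls start s t → Spec_BFS G trolls start s t (BFS G trolls start s t)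

-- ===== LEMMAS AND PROOFS =====

-- a valid Python index for a list of length n
def SGood (n : Nat) (v : Int) : Prop := -(n : Int) ≤ v ∧ v < (n : Int)

theorem slot_lt {n : Nat} {v : Int} (h : SGood n v) : slotOf n v < n := by
  obtain ⟨h1, h2⟩ := h
  unfold slotOf
  split <;> omega

theorem pySetD_neg {α : Type} (xs : List α) (k : Nat) (v : α) (h1 : 0 < k)
    (h2 : k ≤ xs.length) : PySem.List.pySetD xs (-(k : Int)) v = xs.set (xs.length - k) v := by
  simp [PySem.List.pySetD, PySem.List.pySet?, PySem.List.pyIdx?, h2, h1.ne']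

theorem read_slot {α : Type} (xs : List α) (d : α) {v : Int} (h : SGood xs.length v) :
    PySem.List.pyGetD xs v d = xs.getD (slotOf xs.length v) d := by
  obtain ⟨h1, h2⟩ := h
  by_cases hv : v < 0
  · have hk : v = -(((-v).toNat : Nat) : Int) := by omega
    have h1' : 0 < (-v).toNat := by omega
    have h2' : (-v).toNat ≤ xs.length := by omega
    have hs : slotOf xs.length (-(((-v).toNat : Nat) : Int)) = xs.length - (-v).toNat := by
      unfold slotOf; split <;> omega
    rw [hk, PySem.List.pyGetD_neg_natCast _ _ _ h1' h2', hs,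
      List.getD_eq_getElem xs d (by omega)]
  · obtain ⟨k, rfl⟩ : ∃ k : Nat, v = (k : Int) := ⟨v.toNat, by omega⟩
    have hs : slotOf xs.length ((k : Nat) : Int) = k := by
      unfold slotOf; split <;> omega
    rw [PySem.List.pyGetD_natCast, hs]

theorem write_slot (xs : List Bool) {v : Int} (h : SGood xs.length v) :
    PySem.List.pySetD xs v true = xs.set (slotOf xs.length v) true := by
  obtain ⟨h1, h2⟩ := h
  by_cases hv : v < 0
  · have hk : v = -(((-v).toNat : Nat) : Int) := by omega
    have hs : slotOf xs.length v = xs.length - (-v).toNat := by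
      unfold slotOf; split <;> omega
    rw [hk, pySetD_neg _ _ _ (by omega) (by omega), ← hk, hs]
  · have hs : slotOf xs.length v = v.toNat := by
      unfold slotOf; split <;> omega
    rw [PySem.List.pySetD_of_nonneg _ _ (by omega), hs]

theorem row_slot {G : List (List Int)} {v : Int} (h : SGood G.length v) :
    pyRow G v = rowOf G (slotOf G.length v) := by
  unfold pyRow rowOf
  rw [read_slot G [] h, PySem.List.pyGetD_natCast]

theorem getD_set_self (vis : List Bool) {k : Nat} (h : k < vis.length) :
    (vis.set k true).getD k false = true := by
  simp [List.getD_eq_getElem?_getD, h]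

theorem getD_set_ne (vis : List Bool) {k j : Nat} (h : j ≠ k) :
    (vis.set k true).getD j false = vis.getD j false := by
  simp [List.getD_eq_getElem?_getD, Ne.symm h]

-- ----- the reachable-slot closure: basic facts -----

theorem rstep_infl (G : List (List Int)) (ss st : Nat) (S : Finset Nat) :
    S ⊆ rstep G ss st S :=
  Finset.subset_union_left

theorem iter_chain (G : List (List Int)) (ss st : Nat) :
    ∀ k l : Nat, k ≤ l → (rstep G ss st)^[k] {st} ⊆ (rstep G ss st)^[l] {st} := by
  intro k l hkl
  induction l with
  | zero => have : k = 0 := by omega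
            subst this; exact Finset.Subset.refl _
  | succ l ih =>
    by_cases hk : k = l + 1
    · subst hk; exact Finset.Subset.refl _
    · have h1 := ih (by omega)
      intro x hx
      rw [Function.iterate_succ_apply' (rstep G ss st) l {st}]
      exact rstep_infl G ss st _ (h1 hx)

theorem st_mem_rset (G : List (List Int)) (ss st : Nat) : st ∈ rset G ss st := by
  have := iter_chain G ss st 0 G.length (by omega)
  exact this (by simp)

theorem mem_rstep_new {G : List (List Int)} {ss st : Nat} {S : Finset Nat} {x : Nat}
    (hx : x ∈ rstep G ss st S) :
    x ∈ S ∨ ∃ j ∈ S, (j = st ∨ j ≠ ss) ∧ ∃ v ∈ rowOf G j, slotOf G.length v = x := by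
  rcases Finset.mem_union.mp hx with h | h
  · exact Or.inl h
  · right
    obtain ⟨j, hj, hmem⟩ := Finset.mem_biUnion.mp h
    by_cases hg : j = st ∨ j ≠ ss
    · rw [if_pos hg] at hmem
      obtain ⟨v, hv, hvx⟩ := List.mem_map.mp (List.mem_toFinset.mp hmem)
      exact ⟨j, hj, hg, v, hv, hvx⟩
    · rw [if_neg hg] at hmem
      cases hmem

theorem rstep_add {G : List (List Int)} {ss st : Nat} {S : Finset Nat} {j : Nat}
    (hj : j ∈ S) (hg : j = st ∨ j ≠ ss) {v : Int} (hv : v ∈ rowOf G j) :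
    slotOf G.length v ∈ rstep G ss st S := by
  apply Finset.mem_union_right
  apply Finset.mem_biUnion.mpr
  exact ⟨j, hj, by rw [if_pos hg]; exact List.mem_toFinset.mpr (List.mem_map_of_mem hv)⟩

theorem iter_bound (G : List (List Int)) (ss st : Nat) (hstn : st < G.length)
    (hGood : ∀ j ∈ rset G ss st, (j = st ∨ j ≠ ss) → ∀ v ∈ rowOf G j, SGood G.length v) :
    ∀ k, k ≤ G.length → (rstep G ss st)^[k] {st} ⊆ Finset.range G.length := by
  intro k
  induction k with
  | zero => intro _; simp [hstn]
  | succ k ih =>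
    intro hk x hx
    rw [Function.iterate_succ_apply'] at hx
    rcases mem_rstep_new hx with h | ⟨j, hj, hg, v, hv, hvx⟩
    · exact ih (by omega) h
    · have hjr : j ∈ rset G ss st := iter_chain G ss st k G.length (by omega) hj
      have := slot_lt (hGood j hjr hg v hv)
      rw [hvx] at this
      exact Finset.mem_range.mpr this

theorem iter_eq_propagate (G : List (List Int)) (ss st : Nat) {k : Nat}
    (h : (rstep G ss st)^[k + 1] {st} = (rstep G ss st)^[k] {st}) :
    ∀ d : Nat, (rstep G ss st)^[k + d] {st} = (rstep G ss st)^[k] {st} := by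
  intro d
  induction d with
  | zero => rfl
  | succ d ih =>
    have h1 : k + (d + 1) = (k + d) + 1 := by omega
    have h2 := Function.iterate_succ_apply' (rstep G ss st) (k + d) ({st} : Finset Nat)
    have h3 := Function.iterate_succ_apply' (rstep G ss st) k ({st} : Finset Nat)
    rw [h1, h2, ih, ← h3, h]

theorem rset_stable (G : List (List Int)) (ss st : Nat) (hstn : st < G.length)
    (hGood : ∀ j ∈ rset G ss st, (j = st ∨ j ≠ ss) → ∀ v ∈ rowOf G j, SGood G.length v) :
    rstep G ss st (rset G ss st) = rset G ss st := by
  unfold rset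
  rw [← Function.iterate_succ_apply' (rstep G ss st) G.length {st}]
  by_contra hne
  have hstrict : ∀ k, k ≤ G.length →
      (rstep G ss st)^[k] {st} ≠ (rstep G ss st)^[k + 1] {st} := by
    intro k hk heq
    apply hne
    have h1 := iter_eq_propagate G ss st heq.symm (G.length - k)
    have h2 := iter_eq_propagate G ss st heq.symm (G.length + 1 - k)
    rw [show k + (G.length - k) = G.length by omega] at h1
    rw [show k + (G.length + 1 - k) = G.length + 1 by omega] at h2
    rw [h1, h2]
  have hcard : ∀ k, k ≤ G.length → k + 1 ≤ ((rstep G ss st)^[k] {st}).card := by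
    intro k
    induction k with
    | zero => intro _; simp
    | succ k ih =>
      intro hk
      have hsub : (rstep G ss st)^[k] {st} ⊆ (rstep G ss st)^[k + 1] {st} :=
        iter_chain G ss st k (k + 1) (by omega)
      have hlt : ((rstep G ss st)^[k] {st}).card < ((rstep G ss st)^[k + 1] {st}).card :=
        Finset.card_lt_card (ssubset_of_subset_of_ne hsub (hstrict k (by omega)))
      have := ih (by omega)
      omega
  have h1 := hcard G.length (le_refl _)
  have h2 := Finset.card_le_card (iter_bound G ss st hstn hGood G.length (le_refl _))
  rw [Finset.card_range] at h2
  omega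

theorem rset_closed (G : List (List Int)) (ss st : Nat) (hstn : st < G.length)
    (hGood : ∀ j ∈ rset G ss st, (j = st ∨ j ≠ ss) → ∀ v ∈ rowOf G j, SGood G.length v)
    {j : Nat} (hj : j ∈ rset G ss st) (hg : j = st ∨ j ≠ ss) {v : Int}
    (hv : v ∈ rowOf G j) : slotOf G.length v ∈ rset G ss st := by
  rw [← rset_stable G ss st hstn hGood]
  exact rstep_add hj hg hv

theorem rset_lt (G : List (List Int)) (ss st : Nat) (hstn : st < G.length)
    (hGood : ∀ j ∈ rset G ss st, (j = st ∨ j ≠ ss) → ∀ v ∈ rowOf G j, SGood G.length v)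
    {j : Nat} (hj : j ∈ rset G ss st) : j < G.length :=
  Finset.mem_range.mp (iter_bound G ss st hstn hGood G.length (le_refl _) hj)

-- ----- joint invariants of the two programs (slots are Nat indices < len(G)) -----

-- total = base + Σ of the slot values marked after initialisation
def mSum (val : Nat → Int) (init vis : List Bool) : Int :=
  ∑ i ∈ Finset.range vis.length,
    (if vis.getD i false = true ∧ init.getD i false = false then val i else 0)

def unvis (vis : List Bool) : Nat :=
  ∑ i ∈ Finset.range vis.length, (if vis.getD i false = true then 0 else 1)

def StInv (G : List (List Int)) (val : Nat → Int) (base : Int) (ss st : Nat)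
    (init vis : List Bool) (tot : Int) : Prop :=
  vis.length = G.length ∧
  (∀ j : Nat, init.getD j false = true → vis.getD j false = true) ∧
  (∀ j : Nat, j < G.length → vis.getD j false = true → (j = ss ∨ j ∈ rset G ss st)) ∧
  vis.getD st false = true ∧ vis.getD ss false = true ∧
  tot = base + mSum val init vis

def PendInv (G : List (List Int)) (ss st : Nat) (vis : List Bool) (p : List Int) : Prop :=
  ∀ x ∈ p, SGood G.length x ∧ (slotOf G.length x = st ∨ slotOf G.length x ≠ ss) ∧
    slotOf G.length x ∈ rset G ss st ∧ vis.getD (slotOf G.length x) false = true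

-- every expandable visited slot is pending or already fully expanded
def Closed (G : List (List Int)) (ss st : Nat) (vis : List Bool) (p : List Int) : Prop :=
  ∀ j : Nat, j < G.length → vis.getD j false = true → (j = st ∨ j ≠ ss) →
    (∃ x ∈ p, slotOf G.length x = j) ∨
    ∀ v ∈ rowOf G j, vis.getD (slotOf G.length v) false = true

-- the final visited array is pinned down completely
def CharVis (G : List (List Int)) (ss st : Nat) (vis : List Bool) : Prop :=
  vis.length = G.length ∧
  ∀ j : Nat, j < G.length → (vis.getD j false = true ↔ (j = ss ∨ j ∈ rset G ss st))

-- B's reach array: exactly the slots discovered from t (visited minus the pre-marked s)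
def RInv (G : List (List Int)) (ss st : Nat) (vis reach : List Bool) : Prop :=
  reach.length = G.length ∧
  reach.getD st false = true ∧
  (∀ j : Nat, reach.getD j false = true →
    (j = st ∨ j ≠ ss) ∧ j ∈ rset G ss st ∧ vis.getD j false = true) ∧
  (∀ j : Nat, j < G.length → vis.getD j false = true → j = ss ∨ reach.getD j false = true)

theorem mSum_set (val : Nat → Int) (init vis : List Bool) {k : Nat}
    (hk : k < vis.length) (hv : vis.getD k false = false) (hi : init.getD k false = false) :
    mSum val init (vis.set k true) = mSum val init vis + val k := by
  unfold mSum
  rw [List.length_set]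
  have hmem : k ∈ Finset.range vis.length := Finset.mem_range.mpr hk
  rw [← Finset.add_sum_erase _ _ hmem, ← Finset.add_sum_erase _ _ hmem]
  have h1 : ∀ j ∈ (Finset.range vis.length).erase k,
      (if (vis.set k true).getD j false = true ∧ init.getD j false = false then val j else 0)
      = (if vis.getD j false = true ∧ init.getD j false = false then val j else 0) := by
    intro j hj
    rw [getD_set_ne vis (Finset.ne_of_mem_erase hj)]
  rw [Finset.sum_congr rfl h1]
  rw [getD_set_self vis hk]
  rw [List.getD_eq_getElem?_getD] at hv hi
  simp [hv, hi, add_comm]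

theorem unvis_set (vis : List Bool) {k : Nat}
    (hk : k < vis.length) (hv : vis.getD k false = false) :
    unvis vis = unvis (vis.set k true) + 1 := by
  unfold unvis
  rw [List.length_set]
  have hmem : k ∈ Finset.range vis.length := Finset.mem_range.mpr hk
  rw [← Finset.add_sum_erase _ _ hmem, ← Finset.add_sum_erase _ _ hmem]
  have h1 : ∀ j ∈ (Finset.range vis.length).erase k,
      (if (vis.set k true).getD j false = true then (0:Nat) else 1)
      = (if vis.getD j false = true then 0 else 1) := by
    intro j hj
    rw [getD_set_ne vis (Finset.ne_of_mem_erase hj)]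
  rw [Finset.sum_congr rfl h1]
  rw [getD_set_self vis hk]
  rw [List.getD_eq_getElem?_getD] at hv
  simp [hv, add_comm]

theorem unvis_le (vis : List Bool) : unvis vis ≤ vis.length := by
  unfold unvis
  calc ∑ i ∈ Finset.range vis.length, (if vis.getD i false = true then 0 else 1)
      ≤ ∑ _i ∈ Finset.range vis.length, 1 := by
        apply Finset.sum_le_sum; intro i _; split <;> omega
    _ = vis.length := by simp

-- one expansion of a row in A (the inner 'for v in G[u]')
theorem expand (G : List (List Int)) (trolls : List Int) (val : Nat → Int) (base : Int)
    (ss st : Nat) (init : List Bool) :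
    ∀ (row p : List Int) (vis : List Bool) (tot : Int),
    (∀ v ∈ row, SGood G.length v ∧ slotOf G.length v ∈ rset G ss st ∧
      (slotOf G.length v ≠ ss → slotOf G.length v ≠ st →
        pyTroll trolls v = val (slotOf G.length v))) →
    StInv G val base ss st init vis tot →
    PendInv G ss st vis p →
    ∃ q' vis' tot', row.foldl (bfsStep trolls) (p, vis, tot) = (q', vis', tot') ∧
      StInv G val base ss st init vis' tot' ∧
      PendInv G ss st vis' q' ∧
      (∃ ext, q' = p ++ ext) ∧
      (∀ j : Nat, vis.getD j false = true → vis'.getD j false = true) ∧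
      (∀ v ∈ row, vis'.getD (slotOf G.length v) false = true) ∧
      (∀ j : Nat, j < G.length → vis'.getD j false = true → vis.getD j false = false →
        ∃ x ∈ q', slotOf G.length x = j) ∧
      q'.length + 2 * unvis vis' ≤ p.length + 2 * unvis vis := by
  intro row
  induction row with
  | nil =>
    intro p vis tot _ hst hpend
    refine ⟨p, vis, tot, rfl, hst, hpend, ⟨[], by simp⟩, fun _ h => h, by simp, ?_, le_refl _⟩
    intro j _ h1 h2
    rw [h1] at h2; cases h2
  | cons v vs ih =>
    intro p vis tot hrow hst hpend
    obtain ⟨hvg, hvr, hvval⟩ := hrow v (by simp)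
    obtain ⟨hlen, hinit, hsound, hvt, hvs, htot⟩ := hst
    have hvg' : SGood vis.length v := by rw [hlen]; exact hvg
    have hread : pyVisGet vis v = vis.getD (slotOf G.length v) false := by
      unfold pyVisGet
      rw [read_slot vis false hvg', hlen]
    by_cases hvis : pyVisGet vis v = true
    · -- already visited: state unchanged
      simp only [List.foldl_cons, bfsStep, hvis, if_true]
      obtain ⟨q', vis', tot', heq, hst', hpend', hext, hmono, hdone, hnew, hmeas⟩ :=
        ih p vis tot (fun w hw => hrow w (by simp [hw]))
          ⟨hlen, hinit, hsound, hvt, hvs, htot⟩ hpend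
      refine ⟨q', vis', tot', heq, hst', hpend', hext, hmono, ?_, hnew, hmeas⟩
      intro w hw
      rcases List.mem_cons.mp hw with rfl | hw'
      · rw [hread] at hvis
        exact hmono _ hvis
      · exact hdone w hw'
    · -- new slot: mark it, add its troll count, append the spelling
      have hvisf : pyVisGet vis v = false := by revert hvis; cases pyVisGet vis v <;> simp
      simp only [List.foldl_cons, bfsStep, hvisf, Bool.false_eq_true, if_false]
      have hkn : slotOf G.length v < vis.length := by rw [hlen]; exact slot_lt hvg
      have hgd : vis.getD (slotOf G.length v) false = false := by rw [← hread]; exact hvisf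
      have hgi : init.getD (slotOf G.length v) false = false := by
        cases h : init.getD (slotOf G.length v) false
        · rfl
        · rw [hinit _ h] at hgd; cases hgd
      have hne_s : slotOf G.length v ≠ ss := by
        intro h; rw [h, hvs] at hgd; cases hgd
      have hne_t : slotOf G.length v ≠ st := by
        intro h; rw [h, hvt] at hgd; cases hgd
      have hvset : pyVisSet vis v = vis.set (slotOf G.length v) true := by
        unfold pyVisSet
        rw [write_slot vis hvg', hlen]
      have hlen2 : (pyVisSet vis v).length = G.length := by
        rw [hvset, List.length_set, hlen]
      have hmono2 : ∀ j : Nat, vis.getD j false = true →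
          (pyVisSet vis v).getD j false = true := by
        intro j hj
        rw [hvset]
        by_cases hjk : j = slotOf G.length v
        · subst hjk; exact getD_set_self vis hkn
        · rw [getD_set_ne vis hjk]; exact hj
      have hget2 : ∀ j : Nat, (pyVisSet vis v).getD j false = true →
          j = slotOf G.length v ∨ vis.getD j false = true := by
        intro j hj
        by_cases hjk : j = slotOf G.length v
        · exact Or.inl hjk
        · right; rw [hvset, getD_set_ne vis hjk] at hj; exact hj
      have hself2 : (pyVisSet vis v).getD (slotOf G.length v) false = true := by
        rw [hvset]; exact getD_set_self vis hkn
      have hst2 : StInv G val base ss st init (pyVisSet vis v) (tot + pyTroll trolls v) := by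
        refine ⟨hlen2, fun j hj => hmono2 j (hinit j hj), ?_, hmono2 _ hvt, hmono2 _ hvs, ?_⟩
        · intro j hjn hj
          rcases hget2 j hj with rfl | hj'
          · exact Or.inr hvr
          · exact hsound j hjn hj'
        · rw [hvset, mSum_set val init vis hkn hgd hgi, htot, hvval hne_s hne_t]
          ring
      have hpend2 : PendInv G ss st (pyVisSet vis v) (p ++ [v]) := by
        intro x hx
        rcases List.mem_append.mp hx with hx' | hx'
        · obtain ⟨h1, h2, h3, h4⟩ := hpend x hx'
          exact ⟨h1, h2, h3, hmono2 _ h4⟩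
        · rw [List.mem_singleton.mp hx']
          exact ⟨hvg, Or.inr hne_s, hvr, hself2⟩
      obtain ⟨q', vis', tot', heq, hst', hpend', ⟨ext, hext⟩, hmono', hdone', hnew', hmeas'⟩ :=
        ih (p ++ [v]) (pyVisSet vis v) (tot + pyTroll trolls v)
          (fun w hw => hrow w (by simp [hw])) hst2 hpend2
      refine ⟨q', vis', tot', heq, hst', hpend', ⟨v :: ext, by simp [hext]⟩, ?_, ?_, ?_, ?_⟩
      · intro j hj; exact hmono' j (hmono2 j hj)
      · intro w hw
        rcases List.mem_cons.mp hw with rfl | hw'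
        · exact hmono' _ hself2
        · exact hdone' w hw'
      · intro j hjn hj' hjold
        by_cases hjk : j = slotOf G.length v
        · subst hjk
          refine ⟨v, ?_, rfl⟩
          rw [hext]
          exact List.mem_append_left _ (List.mem_append_right _ (by simp))
        · have : (pyVisSet vis v).getD j false = false := by
            rw [hvset, getD_set_ne vis hjk]; exact hjold
          exact hnew' j hjn hj' this
      · have hu : unvis vis = unvis (pyVisSet vis v) + 1 := by
          rw [hvset]; exact unvis_set vis hkn hgd
        have hl : (p ++ [v]).length = p.length + 1 := by simp
        omega

-- an empty worklist with the invariants pins the visited array down completely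
theorem final_char {G : List (List Int)} {val : Nat → Int} {base : Int} {ss st : Nat}
    {init vis : List Bool} {tot : Int} (hstn : st < G.length)
    (hGood : ∀ j ∈ rset G ss st, (j = st ∨ j ≠ ss) → ∀ v ∈ rowOf G j, SGood G.length v)
    (hst : StInv G val base ss st init vis tot) (hcl : Closed G ss st vis []) :
    CharVis G ss st vis := by
  obtain ⟨hlen, _, hsound, hvt, hvs, _⟩ := hst
  have hcl' : ∀ j ∈ rset G ss st, (j = st ∨ j ≠ ss) → vis.getD j false = true →
      ∀ v ∈ rowOf G j, vis.getD (slotOf G.length v) false = true := by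
    intro j hj hg hv
    rcases hcl j (rset_lt G ss st hstn hGood hj) hv hg with ⟨x, hx, _⟩ | h
    · cases hx
    · exact h
  have haux : ∀ k, k ≤ G.length → ∀ j ∈ (rstep G ss st)^[k] {st},
      vis.getD j false = true := by
    intro k
    induction k with
    | zero => intro _ j hj; simp at hj; rw [hj]; exact hvt
    | succ k ih =>
      intro hk j hj
      rw [Function.iterate_succ_apply'] at hj
      rcases mem_rstep_new hj with h | ⟨j', hj', hg, v, hv, hvx⟩
      · exact ih (by omega) j h
      · have hj'r : j' ∈ rset G ss st := iter_chain G ss st k G.length (by omega) hj'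
        have := hcl' j' hj'r hg (ih (by omega) j' hj') v hv
        rw [hvx] at this
        exact this
  refine ⟨hlen, fun j hjn => ⟨hsound j hjn, ?_⟩⟩
  intro h
  rcases h with h | h
  · rw [h]; exact hvs
  · exact haux G.length (le_refl _) j h

theorem char_unique {G : List (List Int)} {ss st : Nat} {v1 v2 : List Bool}
    (h1 : CharVis G ss st v1) (h2 : CharVis G ss st v2) : v1 = v2 := by
  obtain ⟨hl1, hc1⟩ := h1
  obtain ⟨hl2, hc2⟩ := h2
  apply List.ext_getElem (by omega)
  intro i hi1 hi2
  have hig : i < G.length := by omega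
  have e1 : v1.getD i false = v1[i] := List.getD_eq_getElem v1 false hi1
  have e2 : v2.getD i false = v2[i] := List.getD_eq_getElem v2 false hi2
  have := (hc1 i hig).trans (hc2 i hig).symm
  rw [e1, e2] at this
  cases hb1 : v1[i] <;> cases hb2 : v2[i] <;> rw [hb1, hb2] at this <;> simp_all

-- A's while-loop: from an invariant state it computes the characterised total
theorem bfs_run (G : List (List Int)) (trolls : List Int) (val : Nat → Int) (base : Int)
    (ss st : Nat) (init : List Bool) (hstn : st < G.length)
    (hGood : ∀ j ∈ rset G ss st, (j = st ∨ j ≠ ss) → ∀ v ∈ rowOf G j, SGood G.length v)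
    (hval : ∀ j ∈ rset G ss st, (j = st ∨ j ≠ ss) → ∀ v ∈ rowOf G j,
      slotOf G.length v ≠ ss → slotOf G.length v ≠ st →
      pyTroll trolls v = val (slotOf G.length v)) :
    ∀ (fuel : Nat) (q : List Int) (vis : List Bool) (tot : Int),
    StInv G val base ss st init vis tot → PendInv G ss st vis q → Closed G ss st vis q →
    q.length + 2 * unvis vis ≤ fuel →
    ∃ visF, CharVis G ss st visF ∧
      bfsLoop G trolls fuel q vis tot = base + mSum val init visF := by
  intro fuel
  induction fuel with
  | zero =>
    intro q vis tot hst hpend hcl hfu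
    have hq : q = [] := by
      cases q with
      | nil => rfl
      | cons a l => simp at hfu
    subst hq
    exact ⟨vis, final_char hstn hGood hst hcl, by simpa [bfsLoop] using hst.2.2.2.2.2⟩
  | succ fuel ihf =>
    intro q vis tot hst hpend hcl hfu
    cases q with
    | nil => exact ⟨vis, final_char hstn hGood hst hcl, by simpa [bfsLoop] using hst.2.2.2.2.2⟩
    | cons u qs =>
      obtain ⟨hug, hugd, hur, huv⟩ := hpend u (by simp)
      have hrowu : pyRow G u = rowOf G (slotOf G.length u) := row_slot hug
      have hrowok : ∀ v ∈ pyRow G u, SGood G.length v ∧ slotOf G.length v ∈ rset G ss st ∧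
          (slotOf G.length v ≠ ss → slotOf G.length v ≠ st →
            pyTroll trolls v = val (slotOf G.length v)) := by
        intro v hv
        rw [hrowu] at hv
        exact ⟨hGood _ hur hugd v hv, rset_closed G ss st hstn hGood hur hugd hv,
          fun h1 h2 => hval _ hur hugd v hv h1 h2⟩
      obtain ⟨q', vis', tot', heq, hst', hpend', ⟨ext, hext⟩, hmono, hdone, hnew, hmeas⟩ :=
        expand G trolls val base ss st init (pyRow G u) qs vis tot hrowok hst
          (fun x hx => hpend x (by simp [hx]))
      have hcl' : Closed G ss st vis' q' := by
        intro i hi hvis' hcond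
        by_cases hold : vis.getD i false = true
        · rcases hcl i hi hold hcond with ⟨x, hx, hxi⟩ | hrowdone
          · rcases List.mem_cons.mp hx with rfl | hxq
            · right
              intro v hv
              apply hdone
              rw [hrowu, hxi]
              exact hv
            · exact Or.inl ⟨x, by rw [hext]; exact List.mem_append_left _ hxq, hxi⟩
          · right
            intro v hv
            exact hmono _ (hrowdone v hv)
        · exact Or.inl (hnew i hi hvis' (by revert hold; cases vis.getD i false <;> simp))
      apply ihf q' vis' tot' hst' hpend' hcl' (by simp at hfu ⊢; omega) |>.imp
      intro visF ⟨h1, h2⟩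
      refine ⟨h1, ?_⟩
      rw [← h2]
      simp only [bfsLoop, heq]

-- ----- B's saturation: invariants of the innermost loop -----

theorem satExpand (G : List (List Int)) (trolls : List Int) (val : Nat → Int) (base : Int)
    (ss st : Nat) (init : List Bool) :
    ∀ (row : List Int) (vis reach : List Bool) (tot : Int) (chg : Bool),
    (∀ v ∈ row, SGood G.length v ∧ slotOf G.length v ∈ rset G ss st ∧
      (slotOf G.length v ≠ ss → slotOf G.length v ≠ st →
        pyTroll trolls v = val (slotOf G.length v))) →
    StInv G val base ss st init vis tot →
    RInv G ss st vis reach →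
    ∃ vis' reach' tot' chg',
      row.foldl (satStep trolls) (vis, reach, tot, chg) = (vis', reach', tot', chg') ∧
      StInv G val base ss st init vis' tot' ∧
      RInv G ss st vis' reach' ∧
      unvis vis' ≤ unvis vis ∧
      (chg' = false → chg = false ∧ vis' = vis ∧ reach' = reach ∧ tot' = tot ∧
        ∀ v ∈ row, vis.getD (slotOf G.length v) false = true) ∧
      (chg = false → chg' = true → unvis vis' < unvis vis) := by
  intro row
  induction row with
  | nil =>
    intro vis reach tot chg _ hst hr
    exact ⟨vis, reach, tot, chg, rfl, hst, hr, le_refl _,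
      fun h => ⟨h, rfl, rfl, rfl, by simp⟩,
      fun h1 h2 => absurd h2 (by rw [h1]; simp)⟩
  | cons v vs ih =>
    intro vis reach tot chg hrow hst hr
    obtain ⟨hvg, hvr, hvval⟩ := hrow v (by simp)
    obtain ⟨hlen, hinit, hsound, hvt, hvs, htot⟩ := hst
    obtain ⟨hrlen, hrst, hrprop, hvisr⟩ := hr
    have hvg' : SGood vis.length v := by rw [hlen]; exact hvg
    have hread : pyVisGet vis v = vis.getD (slotOf G.length v) false := by
      unfold pyVisGet
      rw [read_slot vis false hvg', hlen]
    by_cases hvis : pyVisGet vis v = true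
    · -- already visited: state unchanged
      simp only [List.foldl_cons, satStep, hvis, if_true]
      obtain ⟨vis', reach', tot', chg', heq, hst', hr', hm, hnc, hstrict⟩ :=
        ih vis reach tot chg (fun w hw => hrow w (by simp [hw]))
          ⟨hlen, hinit, hsound, hvt, hvs, htot⟩ ⟨hrlen, hrst, hrprop, hvisr⟩
      refine ⟨vis', reach', tot', chg', heq, hst', hr', hm, ?_, hstrict⟩
      intro h
      obtain ⟨h1, h2, h3, h4, h5⟩ := hnc h
      refine ⟨h1, h2, h3, h4, ?_⟩
      intro w hw
      rcases List.mem_cons.mp hw with rfl | hw'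
      · rw [hread] at hvis; exact hvis
      · exact h5 w hw'
    · -- new slot: mark visited and reach, add its troll count, set changed
      have hvisf : pyVisGet vis v = false := by revert hvis; cases pyVisGet vis v <;> simp
      simp only [List.foldl_cons, satStep, hvisf, Bool.false_eq_true, if_false]
      have hkn : slotOf G.length v < vis.length := by rw [hlen]; exact slot_lt hvg
      have hrkn : slotOf G.length v < reach.length := by rw [hrlen]; exact slot_lt hvg
      have hgd : vis.getD (slotOf G.length v) false = false := by rw [← hread]; exact hvisf
      have hgi : init.getD (slotOf G.length v) false = false := by
        cases h : init.getD (slotOf G.length v) false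
        · rfl
        · rw [hinit _ h] at hgd; cases hgd
      have hne_s : slotOf G.length v ≠ ss := by
        intro h; rw [h, hvs] at hgd; cases hgd
      have hne_t : slotOf G.length v ≠ st := by
        intro h; rw [h, hvt] at hgd; cases hgd
      have hrg' : SGood reach.length v := by rw [hrlen]; exact hvg
      have hvset : pyVisSet vis v = vis.set (slotOf G.length v) true := by
        unfold pyVisSet
        rw [write_slot vis hvg', hlen]
      have hrset2 : pyVisSet reach v = reach.set (slotOf G.length v) true := by
        unfold pyVisSet
        rw [write_slot reach hrg', hrlen]
      have hlen2 : (pyVisSet vis v).length = G.length := by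
        rw [hvset, List.length_set, hlen]
      have hmono2 : ∀ j : Nat, vis.getD j false = true →
          (pyVisSet vis v).getD j false = true := by
        intro j hj
        rw [hvset]
        by_cases hjk : j = slotOf G.length v
        · subst hjk; exact getD_set_self vis hkn
        · rw [getD_set_ne vis hjk]; exact hj
      have hget2 : ∀ j : Nat, (pyVisSet vis v).getD j false = true →
          j = slotOf G.length v ∨ vis.getD j false = true := by
        intro j hj
        by_cases hjk : j = slotOf G.length v
        · exact Or.inl hjk
        · right; rw [hvset, getD_set_ne vis hjk] at hj; exact hj
      have hself2 : (pyVisSet vis v).getD (slotOf G.length v) false = true := by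
        rw [hvset]; exact getD_set_self vis hkn
      have hrmono2 : ∀ j : Nat, reach.getD j false = true →
          (pyVisSet reach v).getD j false = true := by
        intro j hj
        rw [hrset2]
        by_cases hjk : j = slotOf G.length v
        · subst hjk; exact getD_set_self reach hrkn
        · rw [getD_set_ne reach hjk]; exact hj
      have hrget2 : ∀ j : Nat, (pyVisSet reach v).getD j false = true →
          j = slotOf G.length v ∨ reach.getD j false = true := by
        intro j hj
        by_cases hjk : j = slotOf G.length v
        · exact Or.inl hjk
        · right; rw [hrset2, getD_set_ne reach hjk] at hj; exact hj
      have hrself2 : (pyVisSet reach v).getD (slotOf G.length v) false = true := by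
        rw [hrset2]; exact getD_set_self reach hrkn
      have hst2 : StInv G val base ss st init (pyVisSet vis v) (tot + pyTroll trolls v) := by
        refine ⟨hlen2, fun j hj => hmono2 j (hinit j hj), ?_, hmono2 _ hvt, hmono2 _ hvs, ?_⟩
        · intro j hjn hj
          rcases hget2 j hj with rfl | hj'
          · exact Or.inr hvr
          · exact hsound j hjn hj'
        · rw [hvset, mSum_set val init vis hkn hgd hgi, htot, hvval hne_s hne_t]
          ring
      have hr2 : RInv G ss st (pyVisSet vis v) (pyVisSet reach v) := by
        refine ⟨by rw [hrset2, List.length_set]; exact hrlen, hrmono2 _ hrst, ?_, ?_⟩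
        · intro j hj
          rcases hrget2 j hj with rfl | hj'
          · exact ⟨Or.inr hne_s, hvr, hself2⟩
          · obtain ⟨a, b, c⟩ := hrprop j hj'
            exact ⟨a, b, hmono2 _ c⟩
        · intro j hjn hj
          rcases hget2 j hj with rfl | hj'
          · exact Or.inr hrself2
          · rcases hvisr j hjn hj' with h | h
            · exact Or.inl h
            · exact Or.inr (hrmono2 _ h)
      obtain ⟨vis', reach', tot', chg', heq, hst', hr', hm, hnc, _⟩ :=
        ih (pyVisSet vis v) (pyVisSet reach v) (tot + pyTroll trolls v) true
          (fun w hw => hrow w (by simp [hw])) hst2 hr2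
      have hu : unvis vis = unvis (pyVisSet vis v) + 1 := by
        rw [hvset]; exact unvis_set vis hkn hgd
      refine ⟨vis', reach', tot', chg', heq, hst', hr', by omega, ?_, ?_⟩
      · intro h
        obtain ⟨h1, _⟩ := hnc h
        exact absurd h1 (by simp)
      · intro _ _
        omega

-- B's 'for u in range(n)' sweep preserves the invariants; an unchanged sweep certifies closure
theorem satSweepAux (G : List (List Int)) (trolls : List Int) (val : Nat → Int) (base : Int)
    (ss st : Nat) (init : List Bool) (hstn : st < G.length)
    (hGood : ∀ j ∈ rset G ss st, (j = st ∨ j ≠ ss) → ∀ v ∈ rowOf G j, SGood G.length v)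
    (hval : ∀ j ∈ rset G ss st, (j = st ∨ j ≠ ss) → ∀ v ∈ rowOf G j,
      slotOf G.length v ≠ ss → slotOf G.length v ≠ st →
      pyTroll trolls v = val (slotOf G.length v)) :
    ∀ (L : List Nat) (vis reach : List Bool) (tot : Int) (chg : Bool),
    StInv G val base ss st init vis tot → RInv G ss st vis reach →
    ∃ vis' reach' tot' chg',
      L.foldl (sweepStep G trolls) (vis, reach, tot, chg) = (vis', reach', tot', chg') ∧
      StInv G val base ss st init vis' tot' ∧
      RInv G ss st vis' reach' ∧
      unvis vis' ≤ unvis vis ∧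
      (chg' = false → chg = false ∧ vis' = vis ∧ reach' = reach ∧ tot' = tot ∧
        ∀ u ∈ L, reach.getD u false = true →
          ∀ v ∈ rowOf G u, vis.getD (slotOf G.length v) false = true) ∧
      (chg = false → chg' = true → unvis vis' < unvis vis) := by
  intro L
  induction L with
  | nil =>
    intro vis reach tot chg hst hr
    exact ⟨vis, reach, tot, chg, rfl, hst, hr, le_refl _,
      fun h => ⟨h, rfl, rfl, rfl, by simp⟩,
      fun h1 h2 => absurd h2 (by rw [h1]; simp)⟩
  | cons u L' ihL =>
    intro vis reach tot chg hst hr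
    have hguard : pyVisGet reach (u : Int) = reach.getD u false := by
      unfold pyVisGet
      rw [PySem.List.pyGetD_natCast]
    by_cases hg : reach.getD u false = true
    · -- reach[u]: expand u's row
      obtain ⟨hugd, hur, _⟩ := hr.2.2.1 u hg
      have hrowu : pyRow G (u : Int) = rowOf G u := rfl
      have hrowok : ∀ v ∈ pyRow G (u : Int), SGood G.length v ∧
          slotOf G.length v ∈ rset G ss st ∧
          (slotOf G.length v ≠ ss → slotOf G.length v ≠ st →
            pyTroll trolls v = val (slotOf G.length v)) := by
        intro v hv
        rw [hrowu] at hv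
        exact ⟨hGood u hur hugd v hv, rset_closed G ss st hstn hGood hur hugd hv,
          fun h1 h2 => hval u hur hugd v hv h1 h2⟩
      obtain ⟨vis1, reach1, tot1, chg1, heq1, hst1, hr1, hm1, hnc1, hstrict1⟩ :=
        satExpand G trolls val base ss st init (pyRow G (u : Int)) vis reach tot chg hrowok hst hr
      obtain ⟨vis', reach', tot', chg', heq2, hst', hr', hm2, hnc2, hstrict2⟩ :=
        ihL vis1 reach1 tot1 chg1 hst1 hr1
      refine ⟨vis', reach', tot', chg', ?_, hst', hr', le_trans hm2 hm1, ?_, ?_⟩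
      · simp only [List.foldl_cons, sweepStep, hguard, hg, if_true, heq1, heq2]
      · intro h
        obtain ⟨h1, h2, h3, h4, h5⟩ := hnc2 h
        obtain ⟨h1', h2', h3', h4', h5'⟩ := hnc1 h1
        refine ⟨h1', by rw [h2, h2'], by rw [h3, h3'], by rw [h4, h4'], ?_⟩
        intro w hw hrw
        rcases List.mem_cons.mp hw with rfl | hw'
        · intro v hv
          exact h5' v (by rw [hrowu]; exact hv)
        · intro v hv
          have h6 := h5 w hw' (by rw [h3']; exact hrw) v hv
          rw [h2'] at h6
          exact h6
      · intro hc hc'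
        by_cases hchg1 : chg1 = true
        · exact lt_of_le_of_lt hm2 (hstrict1 hc hchg1)
        · have h1 : chg1 = false := by revert hchg1; cases chg1 <;> simp
          obtain ⟨_, h2', _, _, _⟩ := hnc1 h1
          have := hstrict2 h1 hc'
          rw [h2'] at this
          exact this
    · -- not reach[u]: skip
      have hgf : pyVisGet reach (u : Int) = false := by
        rw [hguard]; revert hg; cases reach.getD u false <;> simp
      obtain ⟨vis', reach', tot', chg', heq, hst', hr', hm, hnc, hstrict⟩ :=
        ihL vis reach tot chg hst hr
      refine ⟨vis', reach', tot', chg', ?_, hst', hr', hm, ?_, hstrict⟩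
      · simp only [List.foldl_cons, sweepStep, hgf, Bool.false_eq_true, if_false, heq]
      · intro h
        obtain ⟨h1, h2, h3, h4, h5⟩ := hnc h
        refine ⟨h1, h2, h3, h4, ?_⟩
        intro w hw hrw
        rcases List.mem_cons.mp hw with rfl | hw'
        · exact absurd hrw hg
        · exact h5 w hw' hrw

-- B's 'while changed' loop: from an invariant state it computes the characterised total
theorem sat_run (G : List (List Int)) (trolls : List Int) (val : Nat → Int) (base : Int)
    (ss st : Nat) (init : List Bool) (hstn : st < G.length)
    (hGood : ∀ j ∈ rset G ss st, (j = st ∨ j ≠ ss) → ∀ v ∈ rowOf G j, SGood G.length v)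
    (hval : ∀ j ∈ rset G ss st, (j = st ∨ j ≠ ss) → ∀ v ∈ rowOf G j,
      slotOf G.length v ≠ ss → slotOf G.length v ≠ st →
      pyTroll trolls v = val (slotOf G.length v)) :
    ∀ (fuel : Nat) (vis reach : List Bool) (tot : Int),
    StInv G val base ss st init vis tot → RInv G ss st vis reach →
    unvis vis < fuel →
    ∃ visF, CharVis G ss st visF ∧
      satLoop G trolls fuel vis reach tot = base + mSum val init visF := by
  intro fuel
  induction fuel with
  | zero =>
    intro vis reach tot _ _ hfu
    omega
  | succ fuel ihf =>
    intro vis reach tot hst hr hfu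
    obtain ⟨vis', reach', tot', chg', heq, hst', hr', hm, hnc, hstrict⟩ :=
      satSweepAux G trolls val base ss st init hstn hGood hval
        (List.range G.length) vis reach tot false hst hr
    have heq' : satSweep G trolls vis reach tot = (vis', reach', tot', chg') := heq
    cases hc : chg' with
    | false =>
      obtain ⟨_, h2, h3, h4, h5⟩ := hnc hc
      have hcl : Closed G ss st vis [] := by
        intro j hjn hvj hgj
        right
        have hreach : reach.getD j false = true := by
          rcases hr.2.2.2 j hjn hvj with h | h
          · rcases hgj with h' | h'
            · rw [h']; exact hr.2.1
            · exact absurd h h'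
          · exact h
        exact h5 j (List.mem_range.mpr hjn) hreach
      refine ⟨vis, final_char hstn hGood hst hcl, ?_⟩
      simp only [satLoop, heq', hc, Bool.false_eq_true, if_false]
      rw [h4]
      exact hst.2.2.2.2.2
    | true =>
      obtain ⟨visF, hcF, hF⟩ := ihf vis' reach' tot' hst' hr' (by
        have := hstrict rfl hc
        omega)
      refine ⟨visF, hcF, ?_⟩
      simp only [satLoop, heq', hc, if_true]
      exact hF

theorem BFS_ports_eq (G : List (List Int)) (trolls : List Int) (start s t : Int)
    (hpre : Pre_BFS G trolls start s t) : BFS G trolls start s t = BFS_alt G trolls start s t := by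
  obtain ⟨ht1, ht2, ht3, ht4, hs1, hs2, hGood, htb, hcons⟩ := hpre
  have htg : SGood G.length t := ⟨ht1, ht2⟩
  have hsg : SGood G.length s := ⟨hs1, hs2⟩
  have hstn : slotOf G.length t < G.length := slot_lt htg
  have hssn : slotOf G.length s < G.length := slot_lt hsg
  -- a per-slot troll value, well defined on Pre_ by the alias-consistency condition
  obtain ⟨val, hval⟩ : ∃ val : Nat → Int,
      ∀ j ∈ rset G (slotOf G.length s) (slotOf G.length t),
        (j = slotOf G.length t ∨ j ≠ slotOf G.length s) → ∀ v ∈ rowOf G j,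
        slotOf G.length v ≠ slotOf G.length s → slotOf G.length v ≠ slotOf G.length t →
        pyTroll trolls v = val (slotOf G.length v) := by
    classical
    refine ⟨fun k =>
      if h : ∃ v : Int, slotOf G.length v = k ∧
          ∃ j ∈ rset G (slotOf G.length s) (slotOf G.length t),
            (j = slotOf G.length t ∨ j ≠ slotOf G.length s) ∧ v ∈ rowOf G j
      then pyTroll trolls h.choose else 0, ?_⟩
    intro j hj hg v hv hns hnt
    have hP : ∃ v' : Int, slotOf G.length v' = slotOf G.length v ∧
        ∃ j' ∈ rset G (slotOf G.length s) (slotOf G.length t),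
          (j' = slotOf G.length t ∨ j' ≠ slotOf G.length s) ∧ v' ∈ rowOf G j' :=
      ⟨v, rfl, j, hj, hg, hv⟩
    simp only []
    rw [dif_pos hP]
    obtain ⟨hc1, j', hj', hg', hv'⟩ := hP.choose_spec
    exact (hcons j hj hg v hv hns hnt j' hj' hg' hP.choose hv' hc1).symm
  -- the initial visited array
  have hv1 : pyVisSet (List.replicate G.length false) t
      = (List.replicate G.length false).set (slotOf G.length t) true := by
    have := write_slot (List.replicate G.length false) (v := t) (by simpa using htg)
    simpa [pyVisSet] using this
  have hv2 : pyVisSet (pyVisSet (List.replicate G.length false) t) s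
      = ((List.replicate G.length false).set (slotOf G.length t) true).set
          (slotOf G.length s) true := by
    rw [hv1]
    have := write_slot ((List.replicate G.length false).set (slotOf G.length t) true)
      (v := s) (by simpa using hsg)
    simpa [pyVisSet] using this
  set V : List Bool := ((List.replicate G.length false).set (slotOf G.length t) true).set
      (slotOf G.length s) true with hV
  have hlenV : V.length = G.length := by rw [hV]; simp
  have hget0 : ∀ j : Nat, V.getD j false = true ↔
      (j = slotOf G.length s ∨ j = slotOf G.length t) := by
    intro j
    rw [hV]
    by_cases hjs : j = slotOf G.length s
    · subst hjs
      rw [getD_set_self _ (by simp [hssn])]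
      simp
    · rw [getD_set_ne _ hjs]
      by_cases hjt : j = slotOf G.length t
      · subst hjt
        rw [getD_set_self _ (by simp [hstn])]
        simp
      · rw [getD_set_ne _ hjt]
        simp only [List.getD_eq_getElem?_getD, List.getElem?_replicate]
        constructor
        · intro h
          split at h <;> simp_all
        · intro h
          exact absurd h (by simp [hjs, hjt])
  have hst0 : StInv G val (pyTroll trolls t) (slotOf G.length s) (slotOf G.length t)
      V V (pyTroll trolls t) := by
    refine ⟨hlenV, fun j h => h, ?_, (hget0 _).mpr (Or.inr rfl), (hget0 _).mpr (Or.inl rfl), ?_⟩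
    · intro j _ h
      rcases (hget0 j).mp h with h' | h'
      · exact Or.inl h'
      · rw [h']; exact Or.inr (st_mem_rset G _ _)
    · have : mSum val V V = 0 := by
        apply Finset.sum_eq_zero
        intro i _
        split_ifs with h
        · rw [h.1] at h
          exact absurd h.2 (by simp)
        · rfl
      rw [this]; ring
  -- A's run
  have hpend0 : PendInv G (slotOf G.length s) (slotOf G.length t) V [t] := by
    intro x hx
    rw [List.mem_singleton.mp hx]
    exact ⟨htg, Or.inl rfl, st_mem_rset G _ _, (hget0 _).mpr (Or.inr rfl)⟩
  have hcl0 : Closed G (slotOf G.length s) (slotOf G.length t) V [t] := by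
    intro i _ hv hc
    left
    refine ⟨t, by simp, ?_⟩
    rcases (hget0 i).mp hv with h' | h'
    · rcases hc with hc | hc
      · rw [hc]
      · exact absurd h' hc
    · rw [h']
  have hfu0 : [t].length + 2 * unvis V ≤ 2 * G.length + 2 := by
    have := unvis_le V
    rw [hlenV] at this
    simp; omega
  obtain ⟨visA, hcA, hA⟩ :=
    bfs_run G trolls val (pyTroll trolls t) (slotOf G.length s) (slotOf G.length t) V
      hstn hGood hval (2 * G.length + 2) [t] V (pyTroll trolls t) hst0 hpend0 hcl0 hfu0
  -- B's run
  have hr1 : pyVisSet (List.replicate G.length false) t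
      = (List.replicate G.length false).set (slotOf G.length t) true := hv1
  set R0 : List Bool := (List.replicate G.length false).set (slotOf G.length t) true with hR
  have hlenR : R0.length = G.length := by rw [hR]; simp
  have hgetR : ∀ j : Nat, R0.getD j false = true ↔ j = slotOf G.length t := by
    intro j
    rw [hR]
    by_cases hjt : j = slotOf G.length t
    · subst hjt
      rw [getD_set_self _ (by simp [hstn])]
      simp
    · rw [getD_set_ne _ hjt]
      simp only [List.getD_eq_getElem?_getD, List.getElem?_replicate]
      constructor
      · intro h
        split at h <;> simp_all
      · intro h
        exact absurd h hjt
  have hr0 : RInv G (slotOf G.length s) (slotOf G.length t) V R0 := by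
    refine ⟨hlenR, (hgetR _).mpr rfl, ?_, ?_⟩
    · intro j hj
      have hjt := (hgetR j).mp hj
      subst hjt
      exact ⟨Or.inl rfl, st_mem_rset G _ _, (hget0 _).mpr (Or.inr rfl)⟩
    · intro j _ hj
      rcases (hget0 j).mp hj with h | h
      · exact Or.inl h
      · exact Or.inr ((hgetR j).mpr h)
  have hfuB : unvis V < G.length + 1 := by
    have := unvis_le V
    rw [hlenV] at this
    omega
  obtain ⟨visB, hcB, hB⟩ :=
    sat_run G trolls val (pyTroll trolls t) (slotOf G.length s) (slotOf G.length t) V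
      hstn hGood hval (G.length + 1) V R0 (pyTroll trolls t) hst0 hr0 hfuB
  have hAB : visA = visB := char_unique hcA hcB
  simp only [BFS, BFS_alt]
  rw [hv2, hr1, hA, hB, hAB]

-- ===== VERDICT (by name: the statement is the Claim_ definition above) =====
theorem BFS_spec : Claim_equal_BFS := by
  intro G trolls start s t _ hpre
  unfold Spec_BFS
  exact BFS_ports_eq G trolls start s t hpre
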